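-- pv_equiv track=rewrite | github.com/moriyumi0859-ux/life_switch | core/score_engine.py | top_career_ids_for_groups
-- ===== SOURCE A (Python) =====
-- JOB_EXAMPLES = {
--     "analysis": [
--         "data_analyst",
--         "accounting",
--         "audit_assistant",
--         "compliance_assistant",
--         "procurement_admin",
--     ],
--     "admin": [
--         "office_admin",
--         "medical_office",
--         "school_admin",
--         "insurance_clerk",
--         "logistics_admin",
--     ],
--     "it_support": [
--         "internal_se",
--         "dx_support",
--         "helpdesk_l1",
--         "data_operator",
--         "knowledge_management",
--     ],
--     "support": [
--         "career_support",
--         "welfare_staff",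
--         "childcare_worker",
--         "municipal_service_counter",
--         "customer_success_support",
--     ],
--     "public": [
--         "library_staff",
--         "public_admin",
--         "school_admin",
--         "industry_office_specialist",
--     ],
--     "management": [
--         "building_facility_management",
--         "property_management",
--         "bpo_management",
--         "management_role",
--         "health_safety_admin",
--     ],
--     "creative": [
--         "web_engineer",
--         "digital_marketing",
--         "internal_training_support",
--         "process_manual_design",
--     ],
-- }
--
-- def top_career_ids_for_groups(groups: list[str], k_each: int = 2, limit: int = 3) -> list[str]:
--     results = []
--     for g in groups:
--         results.extend(JOB_EXAMPLES.get(g, [])[:k_each])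
--
--     # 重複除去（順序維持）
--     seen = set()
--     uniq = []
--     for x in results:
--         if x not in seen:
--             seen.add(x)
--             uniq.append(x)
--
--     return uniq[:limit]
-- ===== SOURCE B (Python) =====
-- JOB_EXAMPLES = {
--     "analysis": [
--         "data_analyst",
--         "accounting",
--         "audit_assistant",
--         "compliance_assistant",
--         "procurement_admin",
--     ],
--     "admin": [
--         "office_admin",
--         "medical_office",
--         "school_admin",
--         "insurance_clerk",
--         "logistics_admin",
--     ],
--     "it_support": [
--         "internal_se",
--         "dx_support",
--         "helpdesk_l1",
--         "data_operator",
--         "knowledge_management",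
--     ],
--     "support": [
--         "career_support",
--         "welfare_staff",
--         "childcare_worker",
--         "municipal_service_counter",
--         "customer_success_support",
--     ],
--     "public": [
--         "library_staff",
--         "public_admin",
--         "school_admin",
--         "industry_office_specialist",
--     ],
--     "management": [
--         "building_facility_management",
--         "property_management",
--         "bpo_management",
--         "management_role",
--         "health_safety_admin",
--     ],
--     "creative": [
--         "web_engineer",
--         "digital_marketing",
--         "internal_training_support",
--         "process_manual_design",
--     ],
-- }
--
--
-- def _dedup(xs: list[str]) -> list[str]:
--     # Recursive selection: keep the head, purge its duplicates from the rest,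
--     # recurse on what is left.  No seen-set, no membership structure.
--     if not xs:
--         return []
--     head = xs[0]
--     return [head] + _dedup([y for y in xs[1:] if y != head])
--
--
-- def top_career_ids_for_groups(groups: list[str], k_each: int = 2, limit: int = 3) -> list[str]:
--     stream = [x for g in groups for x in JOB_EXAMPLES.get(g, [])[:k_each]]
--     return _dedup(stream)[:limit]
-- ===== Notes on version B (the rewrite author's own statement) =====
-- stated objective: alternative
-- what changed: Replaces A's seen-set accumulator dedup loop with a quickselect-style recursion that keeps the head of the stream and filters all of its later duplicates out of the remainder before recursing, so no auxiliary membership structure (set) is maintained at all.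
import Mathlib
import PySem

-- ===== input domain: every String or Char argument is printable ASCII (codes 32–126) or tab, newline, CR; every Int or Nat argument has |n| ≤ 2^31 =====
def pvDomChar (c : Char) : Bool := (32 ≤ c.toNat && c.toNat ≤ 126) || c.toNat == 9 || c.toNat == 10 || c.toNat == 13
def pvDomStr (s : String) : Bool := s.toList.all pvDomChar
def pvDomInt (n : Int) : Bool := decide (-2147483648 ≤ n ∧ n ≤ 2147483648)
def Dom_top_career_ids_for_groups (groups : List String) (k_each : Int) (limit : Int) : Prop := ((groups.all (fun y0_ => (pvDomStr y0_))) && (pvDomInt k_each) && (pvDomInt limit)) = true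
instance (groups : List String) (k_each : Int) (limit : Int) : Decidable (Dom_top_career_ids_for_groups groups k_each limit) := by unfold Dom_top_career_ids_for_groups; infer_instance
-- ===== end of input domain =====

-- B replaces A's seen-set dedup loop by a recursive head-selection that filters the
-- head's duplicates out of the remainder before recursing (objective: alternative).

-- shared module constant JOB_EXAMPLES (a dict literal in the Python module)
def JOB_EXAMPLES : PySem.Dict String (List String) := PySem.Dict.ofList [
  ("analysis", ["data_analyst", "accounting", "audit_assistant", "compliance_assistant", "procurement_admin"]),
  ("admin", ["office_admin", "medical_office", "school_admin", "insurance_clerk", "logistics_admin"]),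
  ("it_support", ["internal_se", "dx_support", "helpdesk_l1", "data_operator", "knowledge_management"]),
  ("support", ["career_support", "welfare_staff", "childcare_worker", "municipal_service_counter", "customer_success_support"]),
  ("public", ["library_staff", "public_admin", "school_admin", "industry_office_specialist"]),
  ("management", ["building_facility_management", "property_management", "bpo_management", "management_role", "health_safety_admin"]),
  ("creative", ["web_engineer", "digital_marketing", "internal_training_support", "process_manual_design"])]

-- JOB_EXAMPLES.get(g, [])[:k_each]
def jobSlice (g : String) (k_each : Int) : List String :=
  PySem.List.slice (PySem.Dict.getD JOB_EXAMPLES g []) none (some k_each)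

-- ===== PORT A =====
def top_career_ids_for_groups (groups : List String) (k_each : Int) (limit : Int) : List String :=
  let results := groups.foldl (fun acc g => acc ++ jobSlice g k_each) []
  let su := results.foldl
    (fun (p : PySem.Set String × List String) x =>
      if PySem.Set.contains p.1 x then p else (PySem.Set.add p.1 x, p.2 ++ [x]))
    (PySem.Set.empty, [])
  PySem.List.slice su.2 none (some limit)

-- ===== PORT B =====
-- Source B's _dedup: keep the head, purge its duplicates from the rest, recurse
def dedupR : List String → List String
  | [] => []
  | x :: xs => x :: dedupR (xs.filter (fun y => y != x))
termination_by xs => xs.length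
decreasing_by
  simpa using Nat.lt_succ_of_le (List.length_filter_le _ _)

def top_career_ids_for_groups_alt (groups : List String) (k_each : Int) (limit : Int) : List String :=
  let stream := groups.flatMap (fun g => jobSlice g k_each)
  PySem.List.slice (dedupR stream) none (some limit)

-- ===== PRECONDITION & SPEC =====
def Spec_top_career_ids_for_groups (groups : List String) (k_each : Int) (limit : Int) (out : List String) : Prop := out = top_career_ids_for_groups_alt groups k_each limit
instance (groups : List String) (k_each : Int) (limit : Int) (out : List String) : Decidable (Spec_top_career_ids_for_groups groups k_each limit out) := by unfold Spec_top_career_ids_for_groups; infer_instance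

-- ===== CLAIM =====
def Claim_equal_top_career_ids_for_groups : Prop := ∀ (groups : List String) (k_each : Int) (limit : Int), Dom_top_career_ids_for_groups groups k_each limit → Spec_top_career_ids_for_groups groups k_each limit (top_career_ids_for_groups groups k_each limit)

-- ===== LEMMAS AND PROOFS =====

-- A's dedup step and fold, named for the proofs
def ddStep (p : PySem.Set String × List String) (x : String) : PySem.Set String × List String :=
  if PySem.Set.contains p.1 x then p else (PySem.Set.add p.1 x, p.2 ++ [x])

def dd (xs : List String) (st : PySem.Set String × List String) : PySem.Set String × List String :=
  xs.foldl ddStep st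

theorem contains_add (S : PySem.Set String) (x y : String) :
    PySem.Set.contains (PySem.Set.add S x) y = (PySem.Set.contains S y || y == x) := by
  simp only [PySem.Set.add, PySem.Set.contains]
  by_cases h : List.contains S x = true
  · rw [if_pos h]
    by_cases hxy : y = x
    · subst hxy
      simp only [List.contains_eq_mem, decide_eq_true_eq] at h
      simp [h]
    · simp [hxy]
  · rw [if_neg h]
    by_cases hxy : y = x
    · subst hxy; simp
    · simp [hxy]

-- core invariant: A's seen-set fold, started at (S, o), appends to o exactly
-- B's recursive dedup of the stream with S's elements pre-filtered out
theorem dd_eq_dedupR (xs : List String) (S : PySem.Set String) (o : List String) :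
    (dd xs (S, o)).2 = o ++ dedupR (xs.filter (fun x => !(PySem.Set.contains S x))) := by
  induction xs generalizing S o with
  | nil => simp [dd, dedupR]
  | cons x xs ih =>
    simp only [dd, List.foldl_cons, ddStep, List.filter_cons]
    cases hc : PySem.Set.contains S x with
    | true =>
      simp only [if_true, Bool.not_true, Bool.false_eq_true, if_false]
      have ih' := ih S o
      simp only [dd] at ih'
      exact ih'
    | false =>
      simp only [Bool.false_eq_true, if_false, Bool.not_false, if_true]
      have ih' := ih (PySem.Set.add S x) (o ++ [x])
      simp only [dd] at ih'
      rw [ih', dedupR, List.filter_filter, List.append_assoc, List.singleton_append]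
      congr 3
      apply List.filter_congr
      intro y _
      rw [contains_add]
      simp [Bool.not_or, Bool.and_comm, bne]

theorem a_eq_b (groups : List String) (k_each limit : Int) :
    top_career_ids_for_groups groups k_each limit = top_career_ids_for_groups_alt groups k_each limit := by
  unfold top_career_ids_for_groups top_career_ids_for_groups_alt
  rw [PySem.List.foldl_append_eq_flatMap]
  have h := dd_eq_dedupR (groups.flatMap (fun g => jobSlice g k_each)) PySem.Set.empty []
  have hfilter : List.filter (fun x => !(PySem.Set.contains PySem.Set.empty x))
      (groups.flatMap (fun g => jobSlice g k_each)) = groups.flatMap (fun g => jobSlice g k_each) := by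
    simp [PySem.Set.empty, PySem.Set.contains]
  rw [hfilter, List.nil_append] at h
  simp only [dd] at h
  exact congrArg (fun l => PySem.List.slice l none (some limit)) h

-- ===== VERDICT =====
theorem top_career_ids_for_groups_spec : Claim_equal_top_career_ids_for_groups := by
  intro groups k_each limit _
  exact a_eq_b groups k_each limit
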